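-- pv_equiv track=rewrite | github.com/atunnd/Hair-Image-Retrieval | Visualizer/app/utils/image_utils.py | compute_hits_and_misses
-- ===== SOURCE A (Python) =====
-- from typing import Dict, List, Tuple
--
-- def compute_hits_and_misses(dataset_key: str, model_results: List[str], ground_truth: List[str]) -> Tuple[List[str], List[str]]:
--     """Compute hits and misses for model results."""
--     if dataset_key == "korean":
--         # Korean dataset: direct comparison
--         hits = [img for img in model_results if img in ground_truth]
--         misses = [img for img in model_results if img not in hits]
--     else:
--         # Regular dataset: convert hair images to face images for comparison
--         hits = [img for img in model_results if img.replace('_hair.png', '.jpg') in ground_truth]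
--         misses = [img for img in model_results if img not in hits]
--
--     return hits, misses
-- ===== SOURCE B (Python) =====
-- from typing import List, Tuple
--
-- def compute_hits_and_misses(dataset_key: str, model_results: List[str], ground_truth: List[str]) -> Tuple[List[str], List[str]]:
--     """Single-pass partition: pick the key transform up front, then split in one loop."""
--     if dataset_key == "korean":
--         key = lambda img: img
--     else:
--         key = lambda img: img.replace('_hair.png', '.jpg')
--     gt = set(ground_truth)
--     hits: List[str] = []
--     misses: List[str] = []
--     for img in model_results:
--         (hits if key(img) in gt else misses).append(img)
--     return hits, misses
-- ===== Notes on version B (the rewrite author's own statement) =====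
-- stated objective: faster
-- what changed: Replaced A's build-then-rescan (two comprehensions, the second re-scanning the hits list per element) with a single-pass partition over model_results using a hoisted key transform and a set for ground-truth membership.
import Mathlib
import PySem

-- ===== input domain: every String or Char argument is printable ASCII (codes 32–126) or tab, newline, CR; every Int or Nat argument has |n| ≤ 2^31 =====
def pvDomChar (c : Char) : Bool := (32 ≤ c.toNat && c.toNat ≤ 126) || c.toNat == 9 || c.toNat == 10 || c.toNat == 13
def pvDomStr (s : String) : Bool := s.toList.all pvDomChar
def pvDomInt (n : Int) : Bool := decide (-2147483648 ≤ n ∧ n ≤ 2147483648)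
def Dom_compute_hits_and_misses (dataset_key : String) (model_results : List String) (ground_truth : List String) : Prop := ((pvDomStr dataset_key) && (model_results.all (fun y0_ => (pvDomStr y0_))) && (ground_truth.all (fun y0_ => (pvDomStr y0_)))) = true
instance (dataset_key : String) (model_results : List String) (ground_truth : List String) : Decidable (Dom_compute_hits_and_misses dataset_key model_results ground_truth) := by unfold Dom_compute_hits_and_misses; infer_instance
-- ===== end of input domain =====

-- B replaces A's build-then-rescan (second comprehension re-scans the hits list) by a
-- single-pass partition with the key transform hoisted out of the loop (objective: alternative).

-- ===== PORT A =====
def compute_hits_and_misses (dataset_key : String) (model_results : List String) (ground_truth : List String) : List String × List String :=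
  if dataset_key == "korean" then
    let hits := model_results.filter (fun img => ground_truth.contains img)
    let misses := model_results.filter (fun img => !hits.contains img)
    (hits, misses)
  else
    let hits := model_results.filter (fun img => ground_truth.contains (PySem.Str.replace img "_hair.png" ".jpg"))
    let misses := model_results.filter (fun img => !hits.contains img)
    (hits, misses)

-- ===== PORT B =====
-- the single forward loop appending each img to hits or misses
def pvPartitionB (key : String → String) (gt : PySem.Set String) : List String → List String × List String
  | [] => ([], [])
  | img :: rest =>
    let (h, m) := pvPartitionB key gt rest
    if PySem.Set.contains gt (key img) then (img :: h, m) else (h, img :: m)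

def compute_hits_and_misses_alt (dataset_key : String) (model_results : List String) (ground_truth : List String) : List String × List String :=
  let key : String → String :=
    if dataset_key == "korean" then (fun img => img)
    else (fun img => PySem.Str.replace img "_hair.png" ".jpg")
  let gt := PySem.Set.ofList ground_truth
  pvPartitionB key gt model_results

-- ===== PRECONDITION & SPEC =====
def Spec_compute_hits_and_misses (dataset_key : String) (model_results : List String) (ground_truth : List String) (out : List String × List String) : Prop := out = compute_hits_and_misses_alt dataset_key model_results ground_truth
instance (dataset_key : String) (model_results : List String) (ground_truth : List String) (out : List String × List String) : Decidable (Spec_compute_hits_and_misses dataset_key model_results ground_truth out) := by unfold Spec_compute_hits_and_misses; infer_instance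

-- ===== CLAIM (what is proved, stated in full; the proofs are below) =====
def Claim_equal_compute_hits_and_misses : Prop := ∀ (dataset_key : String) (model_results : List String) (ground_truth : List String), Dom_compute_hits_and_misses dataset_key model_results ground_truth → Spec_compute_hits_and_misses dataset_key model_results ground_truth (compute_hits_and_misses dataset_key model_results ground_truth)

-- ===== LEMMAS AND PROOFS =====

-- A's second comprehension ("img not in hits") tests, per element of l, membership in
-- l.filter p; for img ∈ l that is just ¬ p img.
theorem pv_filter_not_mem_filter (p : String → Bool) (l : List String) :
    l.filter (fun x => !(l.filter p).contains x) = l.filter (fun x => !p x) := by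
  apply List.filter_congr
  intro x hx
  simp [List.mem_filter, hx]

-- the set built once answers the same membership question as the raw ground_truth list
theorem pv_set_contains (gt : List String) (x : String) :
    PySem.Set.contains (PySem.Set.ofList gt) x = gt.contains x := by
  simp [PySem.Set.contains, PySem.Set.mem_ofList]

-- the single-pass partition produces exactly A's two filters
theorem pv_partitionB_eq (key : String → String) (gt : List String) (l : List String) :
    pvPartitionB key (PySem.Set.ofList gt) l =
      (l.filter (fun x => gt.contains (key x)), l.filter (fun x => !gt.contains (key x))) := by
  induction l with
  | nil => rfl
  | cons x xs ih =>
    simp only [pvPartitionB, ih, pv_set_contains, List.filter_cons]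
    by_cases h : key x ∈ gt <;> simp [h]

-- ===== VERDICT (by name: the statement is the Claim_ definition above) =====
theorem compute_hits_and_misses_spec : Claim_equal_compute_hits_and_misses := by
  intro dk mr gt _
  unfold Spec_compute_hits_and_misses compute_hits_and_misses compute_hits_and_misses_alt
  by_cases h : (dk == "korean") = true
  · rw [if_pos h, if_pos h]
    rw [pv_partitionB_eq]
    exact congrArg (Prod.mk _) (pv_filter_not_mem_filter (fun img => gt.contains img) mr)
  · rw [if_neg h, if_neg h]
    rw [pv_partitionB_eq]
    exact congrArg (Prod.mk _)
      (pv_filter_not_mem_filter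
        (fun img => gt.contains (PySem.Str.replace img "_hair.png" ".jpg")) mr)
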